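-- pv_equiv track=rewrite | github.com/g-wagen/advent_of_code | python/advent_of_code/2023/aoc_2023_07_2.py | generate_cards_counter
-- ===== SOURCE A (Python) =====
-- def generate_cards_counter(cards_in_hand: str) -> dict:
--     my_cards_counter = {
--         5: 0,
--         4: 0,
--         3: 0,
--         2: 0,
--         1: 0,
--     }
--     unique_cards = ""
--
--     for card in cards_in_hand:
--         if unique_cards.find(card) == -1:
--             unique_cards += card
--
--     for ucard in unique_cards:
--         amount = cards_in_hand.count(ucard)
--         my_cards_counter[amount] += 1
--
--     return my_cards_counter
-- ===== SOURCE B (Python) =====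
-- def generate_cards_counter(cards_in_hand: str) -> dict:
--     # One pass builds a card->count dict (Counter style), so the quadratic
--     # find/count rescans of the original disappear.
--     counts = {}
--     for card in cards_in_hand:
--         counts[card] = counts.get(card, 0) + 1
--     result = {5: 0, 4: 0, 3: 0, 2: 0, 1: 0}
--     for amount in counts.values():
--         result[amount] += 1
--     return result
-- ===== Notes on version B (the rewrite author's own statement) =====
-- stated objective: faster
-- what changed: B builds a card->count dictionary in a single pass and then tallies its values, instead of A's quadratic scheme of scanning the string once per character via str.find to collect unique cards and again via str.count per unique card.
import Mathlib
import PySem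

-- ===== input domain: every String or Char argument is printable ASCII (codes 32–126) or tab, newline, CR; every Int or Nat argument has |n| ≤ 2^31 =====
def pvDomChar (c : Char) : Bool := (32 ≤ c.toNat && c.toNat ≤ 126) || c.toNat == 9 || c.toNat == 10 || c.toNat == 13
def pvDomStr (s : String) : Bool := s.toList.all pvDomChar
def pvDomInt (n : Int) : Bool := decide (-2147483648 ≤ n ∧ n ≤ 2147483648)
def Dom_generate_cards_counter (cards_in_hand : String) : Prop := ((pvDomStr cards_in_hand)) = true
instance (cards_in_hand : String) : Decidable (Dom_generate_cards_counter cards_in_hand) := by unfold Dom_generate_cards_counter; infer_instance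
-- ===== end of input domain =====

-- B replaces A's quadratic find/count rescans by one counting-dict pass over the
-- string followed by a tally of its values (objective: faster).

-- ===== PORT A =====
def generate_cards_counter (cards_in_hand : String) : List (Int × Int) :=
  let cs := cards_in_hand.toList
  let init : PySem.Dict Int Int := PySem.Dict.ofList [(5, 0), (4, 0), (3, 0), (2, 0), (1, 0)]
  -- first loop: unique_cards built with str.find
  let unique : List Char :=
    cs.foldl (fun u c => if PySem.Chars.find u [c] = -1 then u ++ [c] else u) []
  -- second loop: my_cards_counter[amount] += 1 (KeyError, i.e. the none branch, excluded by Pre_)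
  (unique.foldl (fun (d : PySem.Dict Int Int) uc =>
      let amount : Int := (PySem.Chars.count cs [uc] : Int)
      match PySem.Dict.get? d amount with
      | some v => PySem.Dict.insert d amount (v + 1)
      | none => d) init).items

-- ===== PORT B =====
def generate_cards_counter_alt (cards_in_hand : String) : List (Int × Int) :=
  let cs := cards_in_hand.toList
  -- one pass: counts[card] = counts.get(card, 0) + 1
  let counts : PySem.Dict Char Int :=
    cs.foldl (fun d c => PySem.Dict.insert d c (PySem.Dict.getD d c 0 + 1)) PySem.Dict.empty
  let result : PySem.Dict Int Int := PySem.Dict.ofList [(5, 0), (4, 0), (3, 0), (2, 0), (1, 0)]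
  -- tally the multiplicities: result[amount] += 1 (KeyError = none branch, excluded by Pre_)
  ((PySem.Dict.values counts).foldl (fun (r : PySem.Dict Int Int) amount =>
      match PySem.Dict.get? r amount with
      | some v => PySem.Dict.insert r amount (v + 1)
      | none => r) result).items

-- ===== PRECONDITION & SPEC =====
-- Pre_ excludes exactly the strings in which some character occurs more than 5 times:
-- there both Pythons raise KeyError (result dict has keys 1..5 only).
def Pre_generate_cards_counter (cards_in_hand : String) : Prop :=
  (cards_in_hand.toList.all (fun c => cards_in_hand.toList.count c ≤ 5)) = true
instance (cards_in_hand : String) : Decidable (Pre_generate_cards_counter cards_in_hand) := by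
  unfold Pre_generate_cards_counter; infer_instance
def pvWitness_generate_cards_counter : String := "23455"
def Spec_generate_cards_counter (cards_in_hand : String) (out : List (Int × Int)) : Prop := out = generate_cards_counter_alt cards_in_hand
instance (cards_in_hand : String) (out : List (Int × Int)) : Decidable (Spec_generate_cards_counter cards_in_hand out) := by unfold Spec_generate_cards_counter; infer_instance

-- ===== CLAIM (what is proved, stated in full; the proofs are below) =====
def Claim_equal_generate_cards_counter : Prop := ∀ (cards_in_hand : String), Dom_generate_cards_counter cards_in_hand → Pre_generate_cards_counter cards_in_hand → Spec_generate_cards_counter cards_in_hand (generate_cards_counter cards_in_hand)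

-- ===== LEMMAS AND PROOFS =====

-- [c] is an infix of u iff c is an element of u
theorem pv_singleton_infix_iff (c : Char) (u : List Char) : [c] <:+: u ↔ c ∈ u := by
  constructor
  · intro h; exact h.subset (List.mem_singleton_self c)
  · intro h
    obtain ⟨p, q, rfl⟩ := List.append_of_mem h
    exact ⟨p, q, by simp⟩

-- str.count with a single-character needle is List.count
theorem pv_count_go_singleton (c : Char) (l : List Char) (fuel acc : Nat)
    (h : l.length ≤ fuel) :
    PySem.Chars.count.go [c] fuel l acc = acc + l.count c := by
  induction l generalizing fuel acc with
  | nil => cases fuel <;> simp [PySem.Chars.count.go]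
  | cons x t ih =>
    cases fuel with
    | zero => simp at h
    | succ f =>
      simp only [List.length_cons, Nat.succ_le_succ_iff] at h
      by_cases hx : c = x
      · subst hx
        simp [PySem.Chars.count.go, List.isPrefixOf, ih _ _ h, List.count_cons_self]
        omega
      · have hx' : ¬x = c := fun hh => hx hh.symm
        simp only [PySem.Chars.count.go, List.isPrefixOf]
        rw [if_neg (by simp only [Bool.and_true, beq_iff_eq]; first | exact hx' | exact hx), ih _ _ h]
        simp [List.count_cons, hx, hx']

theorem pv_count_singleton (cs : List Char) (c : Char) :
    PySem.Chars.count cs [c] = cs.count c := by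
  simpa [PySem.Chars.count] using pv_count_go_singleton c cs cs.length 0 le_rfl

-- A's first loop is exactly set-dedup in first-occurrence order
theorem pv_unique_eq_ofList (cs : List Char) :
    cs.foldl (fun u c => if PySem.Chars.find u [c] = -1 then u ++ [c] else u) []
      = PySem.Set.ofList cs := by
  rw [PySem.Set.ofList_eq_foldl]
  have hfun : (fun (u : List Char) (c : Char) =>
      if PySem.Chars.find u [c] = -1 then u ++ [c] else u) = PySem.Set.add := by
    funext u c
    rw [PySem.Set.add_eq_ite]
    by_cases hc : c ∈ u
    · rw [if_neg, if_pos hc]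
      rw [PySem.Chars.find_eq_neg_one_iff, pv_singleton_infix_iff]
      simp [hc]
    · rw [if_pos, if_neg hc]
      rw [PySem.Chars.find_eq_neg_one_iff, pv_singleton_infix_iff]
      exact hc
  rw [hfun]

-- ===== VERDICT (by name: the statement is the Claim_ definition above) =====
theorem generate_cards_counter_spec : Claim_equal_generate_cards_counter := by
  unfold Claim_equal_generate_cards_counter
  intro s _ _
  unfold Spec_generate_cards_counter generate_cards_counter generate_cards_counter_alt
  simp only []
  rw [pv_unique_eq_ofList, PySem.Dict.foldl_insert_getD_add_one_eq_counter]
  rw [show PySem.Dict.values (PySem.Dict.counter s.toList)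
        = (PySem.Dict.counter s.toList).items.map (·.2) from rfl]
  rw [PySem.Dict.items_counter, List.map_map, List.foldl_map]
  simp only [pv_count_singleton, Function.comp]
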